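-- pv_equiv track=rewrite | github.com/tos-kamiya/clicra | clicra/clicra.py | clip_text
-- ===== SOURCE A (Python) =====
-- def clip_text(text: str, max_chars: int) -> str:
--     if len(text) == 0:
--         return ""
--
--     snip_str = " ...(snip)... "
--
--     newline_pos = text.find("\n")
--     if newline_pos < 0 or newline_pos > max_chars:
--         return text[:max_chars] + snip_str + "\n"
--
--     while newline_pos >= 0:
--         next_newline_pos = text.find("\n", newline_pos + 1)
--         if next_newline_pos < 0 or next_newline_pos > max_chars:
--             return text[:newline_pos + 1] + snip_str + "\n"
--         newline_pos = next_newline_pos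
-- ===== SOURCE B (Python) =====
-- def clip_text(text: str, max_chars: int) -> str:
--     if len(text) == 0:
--         return ""
--
--     snip_str = " ...(snip)... "
--
--     pos = text.rfind("\n", 0, max_chars + 1) if max_chars >= 0 else -1
--     if pos < 0:
--         return text[:max_chars] + snip_str + "\n"
--     return text[:pos + 1] + snip_str + "\n"
-- ===== Notes on version B (the rewrite author's own statement) =====
-- stated objective: simpler
-- what changed: The incremental forward find-loop that advances newline by newline is replaced by a single backward search: rfind('\n', 0, max_chars+1) (guarded to -1 for negative max_chars) directly yields the last newline within budget.
import Mathlib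
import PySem

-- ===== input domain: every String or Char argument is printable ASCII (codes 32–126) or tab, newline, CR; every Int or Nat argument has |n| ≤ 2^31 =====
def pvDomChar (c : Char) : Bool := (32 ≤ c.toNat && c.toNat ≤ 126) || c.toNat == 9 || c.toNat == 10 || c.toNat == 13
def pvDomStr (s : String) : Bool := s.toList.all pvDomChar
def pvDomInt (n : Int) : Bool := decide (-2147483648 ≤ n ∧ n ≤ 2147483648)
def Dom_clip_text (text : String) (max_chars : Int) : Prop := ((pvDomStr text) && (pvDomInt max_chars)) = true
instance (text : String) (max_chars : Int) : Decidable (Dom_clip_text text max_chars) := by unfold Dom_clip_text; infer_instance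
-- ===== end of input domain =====

-- B replaces A's forward newline-by-newline find-loop with one backward rfind within the budget; objective: simpler.

-- ===== PORT A =====
-- A's while-loop; fuel = len(text) is only a totality guard (each step strictly
-- advances newline_pos, so the fuel supplied by clip_text is never exhausted).
def clipTextLoopA (text : String) (max_chars : Int) (snip_str : String) : Nat → Int → String
  | 0, _ => ""
  | fuel+1, newline_pos =>
    let next_newline_pos := PySem.Str.findFrom text "\n" (newline_pos + 1)
    if next_newline_pos < 0 ∨ max_chars < next_newline_pos then
      PySem.Str.slice text none (some (newline_pos + 1)) ++ snip_str ++ "\n"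
    else
      clipTextLoopA text max_chars snip_str fuel next_newline_pos

def clip_text (text : String) (max_chars : Int) : String :=
  if PySem.Str.len text = 0 then ""
  else
    let snip_str := " ...(snip)... "
    let newline_pos := PySem.Str.find text "\n"
    if newline_pos < 0 ∨ max_chars < newline_pos then
      PySem.Str.slice text none (some max_chars) ++ snip_str ++ "\n"
    else
      clipTextLoopA text max_chars snip_str text.toList.length newline_pos

-- ===== PORT B =====
def clip_text_alt (text : String) (max_chars : Int) : String :=
  if PySem.Str.len text = 0 then ""
  else
    let snip_str := " ...(snip)... "
    let pos := if 0 ≤ max_chars then PySem.Str.rfindFrom text "\n" 0 (some (max_chars + 1)) else -1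
    if pos < 0 then
      PySem.Str.slice text none (some max_chars) ++ snip_str ++ "\n"
    else
      PySem.Str.slice text none (some (pos + 1)) ++ snip_str ++ "\n"

-- ===== PRECONDITION & SPEC =====
def Spec_clip_text (text : String) (max_chars : Int) (out : String) : Prop := out = clip_text_alt text max_chars
instance (text : String) (max_chars : Int) (out : String) : Decidable (Spec_clip_text text max_chars out) := by unfold Spec_clip_text; infer_instance

-- ===== CLAIM (what is proved, stated in full; the proofs are below) =====
def Claim_equal_clip_text : Prop := ∀ (text : String) (max_chars : Int), Dom_clip_text text max_chars → Spec_clip_text text max_chars (clip_text text max_chars)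

-- ===== LEMMAS AND PROOFS =====

-- a singleton list is a prefix iff it is the head
theorem pv_singleton_prefix_iff (c : Char) (l : List Char) : [c] <+: l ↔ l[0]? = some c := by
  cases l with
  | nil => simp
  | cons a t => simp [List.cons_prefix_cons, eq_comm]

theorem pv_isPrefixOf_singleton (c : Char) (l : List Char) :
    List.isPrefixOf [c] l = true ↔ l[0]? = some c := by
  rw [List.isPrefixOf_iff_prefix, pv_singleton_prefix_iff]

theorem pv_prefix_drop_iff (c : Char) (l : List Char) (i : Nat) :
    [c] <+: l.drop i ↔ l[i]? = some c := by
  rw [pv_singleton_prefix_iff]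
  simp [List.getElem?_drop]

theorem pv_singleton_infix_iff (c : Char) (l : List Char) : [c] <:+: l ↔ c ∈ l := by
  constructor
  · intro h; exact h.mem (by simp)
  · intro h
    obtain ⟨s, t, rfl⟩ := List.append_of_mem h
    exact ⟨s, t, by simp⟩

theorem pv_infix_drop_iff (c : Char) (l : List Char) (k : Nat) :
    [c] <:+: l.drop k ↔ ∃ j : Nat, k ≤ j ∧ l[j]? = some c := by
  rw [pv_singleton_infix_iff]
  constructor
  · intro h
    obtain ⟨i, hi⟩ := List.mem_iff_getElem?.1 h
    exact ⟨k + i, by omega, by simpa [List.getElem?_drop] using hi⟩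
  · rintro ⟨j, hk, hj⟩
    refine List.mem_iff_getElem?.2 ⟨j - k, ?_⟩
    rw [List.getElem?_drop]
    simpa [Nat.add_sub_cancel' hk] using hj

-- characterization of rfind.go for a single-character needle
theorem pv_rfind_go_char (t : List Char) (c : Char) (k : Nat) :
    (PySem.Chars.rfind.go t [c] k = -1 ∧ ∀ i ≤ k, t[i]? ≠ some c) ∨
    (∃ p : Nat, PySem.Chars.rfind.go t [c] k = (p : Int) ∧ p ≤ k ∧ t[p]? = some c ∧
      ∀ j, p < j → j ≤ k → t[j]? ≠ some c) := by
  induction k with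
  | zero =>
    by_cases h : t[0]? = some c
    · right
      exact ⟨0, by simp [PySem.Chars.rfind.go, (pv_isPrefixOf_singleton c t).2 h], le_refl _, h,
        by omega⟩
    · left
      constructor
      · simp only [PySem.Chars.rfind.go]
        rw [if_neg]
        intro hp; exact h ((pv_isPrefixOf_singleton c t).1 hp)
      · intro i hi; interval_cases i; exact h
  | succ k ih =>
    by_cases h : t[k+1]? = some c
    · right
      refine ⟨k+1, ?_, le_refl _, h, by omega⟩
      simp only [PySem.Chars.rfind.go]
      rw [if_pos]
      rw [List.isPrefixOf_iff_prefix, pv_prefix_drop_iff]; exact h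
    · have hgo : PySem.Chars.rfind.go t [c] (k+1) = PySem.Chars.rfind.go t [c] k := by
        simp only [PySem.Chars.rfind.go]
        rw [if_neg]
        intro hp
        exact h ((pv_prefix_drop_iff c t (k+1)).1 (List.isPrefixOf_iff_prefix.1 hp))
      rcases ih with ⟨h1, h2⟩ | ⟨p, h1, h2, h3, h4⟩
      · left
        refine ⟨hgo.trans h1, fun i hi => ?_⟩
        rcases Nat.lt_or_ge i (k+1) with hlt | hge
        · exact h2 i (by omega)
        · have : i = k+1 := by omega
          subst this; exact h
      · right
        refine ⟨p, hgo.trans h1, by omega, h3, fun j hj1 hj2 => ?_⟩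
        rcases Nat.lt_or_ge j (k+1) with hlt | hge
        · exact h4 j hj1 (by omega)
        · have : j = k+1 := by omega
          subst this; exact h

-- characterization of B's rfind("\n", 0, max_chars+1) for 0 ≤ max_chars
theorem pv_rfindFrom_spec (s : List Char) (mc : Int) (hmc : 0 ≤ mc) :
    (PySem.Chars.rfindFrom s ['\n'] 0 (some (mc + 1)) = -1 ∧
      ∀ i : Nat, (i : Int) ≤ mc → s[i]? ≠ some '\n') ∨
    (∃ p : Nat, PySem.Chars.rfindFrom s ['\n'] 0 (some (mc + 1)) = (p : Int) ∧
      s[p]? = some '\n' ∧ (p : Int) ≤ mc ∧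
      ∀ j : Nat, p < j → (j : Int) ≤ mc → s[j]? ≠ some '\n') := by
  set n : Int := (s.length : Int) with hn
  set e : Int := if n ≤ mc then n else mc + 1 with he
  have he0 : 0 ≤ e := by rw [he]; split <;> omega
  have hen : e ≤ n := by rw [he]; split <;> omega
  set E : Nat := e.toNat with hE
  have hEn : E ≤ s.length := by omega
  have hEmc : (E : Int) = e := by omega
  set t : List Char := s.take E with ht
  have htlen : t.length = E := by simp [ht, Nat.min_eq_left hEn]
  have htget : ∀ i : Nat, i < E → t[i]? = s[i]? := by
    intro i hi
    simp [ht, hi]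
  have htget' : ∀ i : Nat, E ≤ i → t[i]? = none := by
    intro i hi
    apply List.getElem?_eq_none
    omega
  -- the region [0, E) is exactly the indices (< n) with value ≤ mc
  have hregion : ∀ i : Nat, i < E ↔ (i < s.length ∧ (i : Int) ≤ mc) := by
    intro i
    constructor
    · intro h
      refine ⟨by omega, ?_⟩
      have h' : (i : Int) < e := by omega
      rw [he] at h'; split at h' <;> omega
    · intro ⟨h1, h2⟩
      have h' : (i : Int) < e := by rw [he]; split <;> omega
      omega
  have hunfold : PySem.Chars.rfindFrom s ['\n'] 0 (some (mc + 1)) =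
      (if PySem.Chars.rfind t ['\n'] = -1 then -1 else PySem.Chars.rfind t ['\n']) := by
    have h2 : ¬ (e < 0) := by omega
    simp only [PySem.Chars.rfindFrom]
    simp only [Int.lt_add_one_iff, if_neg (show ¬ (mc+1 < 0) by omega),
      if_neg (show ¬ ((0:Int) < 0) by omega), Int.toNat_zero, List.drop_zero, zero_add]
    rw [if_neg (by rw [← hn, ← he] at *; exact h2)]
  have hrfind : PySem.Chars.rfind t ['\n'] = PySem.Chars.rfind.go t ['\n'] E := by
    simp [PySem.Chars.rfind, htlen]
  rcases pv_rfind_go_char t '\n' E with ⟨h1, h2⟩ | ⟨p, h1, _, h3, h4⟩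
  · left
    constructor
    · rw [hunfold, hrfind, h1]; simp
    · intro i hi hcon
      have hilen : i < s.length := by
        by_contra hge
        rw [List.getElem?_eq_none (by omega)] at hcon
        simp at hcon
      have hiE : i < E := (hregion i).2 ⟨hilen, hi⟩
      exact h2 i (by omega) (by rw [htget i hiE]; exact hcon)
  · right
    have hpE : p < E := by
      by_contra hge
      rw [htget' p (by omega)] at h3
      simp at h3
    refine ⟨p, ?_, by rw [← htget p hpE]; exact h3, ((hregion p).1 hpE).2, ?_⟩
    · rw [hunfold, hrfind, h1]
      simp
    · intro j hj1 hj2 hcon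
      have hjlen : j < s.length := by
        by_contra hge
        rw [List.getElem?_eq_none (by omega)] at hcon
        simp at hcon
      have hjE : j < E := (hregion j).2 ⟨hjlen, hj2⟩
      exact h4 j hj1 (by omega) (by rw [htget j hjE]; exact hcon)

theorem pv_string_eq_empty (t : String) (h : t.toList = []) : t = "" := by
  cases t; simp_all

-- uniqueness of "the last newline within budget"

theorem pv_last_unique (s : List Char) (mc : Int) (p q : Nat)
    (hp : s[p]? = some '\n') (hpm : (p : Int) ≤ mc)
    (hpmax : ∀ j : Nat, p < j → (j : Int) ≤ mc → s[j]? ≠ some '\n')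
    (hq : s[q]? = some '\n') (hqm : (q : Int) ≤ mc)
    (hqmax : ∀ j : Nat, q < j → (j : Int) ≤ mc → s[j]? ≠ some '\n') : p = q := by
  rcases Nat.lt_trichotomy p q with h | h | h
  · exact absurd hq (hpmax q h hqm)
  · exact h
  · exact absurd hp (hqmax p h hpm)

-- A's loop returns the slice at the last newline within budget
theorem pv_loopA_spec (text : String) (mc : Int) (snip : String) (p : Nat)
    (hp : text.toList[p]? = some '\n') (hpm : (p : Int) ≤ mc)
    (hpmax : ∀ j : Nat, p < j → (j : Int) ≤ mc → text.toList[j]? ≠ some '\n') :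
    ∀ (fuel np : Nat), text.toList.length - np ≤ fuel →
      text.toList[np]? = some '\n' → (np : Int) ≤ mc →
      clipTextLoopA text mc snip fuel (np : Int) =
        PySem.Str.slice text none (some ((p : Int) + 1)) ++ snip ++ "\n" := by
  intro fuel
  induction fuel with
  | zero =>
    intro np hfuel hnp _
    have hlt : np < text.toList.length := by
      by_contra hge
      rw [List.getElem?_eq_none (by omega)] at hnp
      simp at hnp
    omega
  | succ fuel ih =>
    intro np hfuel hnp hnpm
    have hnplen : np < text.toList.length := by
      by_contra hge
      rw [List.getElem?_eq_none (by omega)] at hnp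
      simp at hnp
    set s := text.toList with hs
    have hstep : ((np : Int) + 1) = ((np + 1 : Nat) : Int) := by push_cast; ring
    have hle : np + 1 ≤ s.length := by omega
    have hff : PySem.Str.findFrom text "\n" ((np : Int) + 1) =
        (if PySem.Chars.find (s.drop (np+1)) ['\n'] = -1 then -1
         else ((np+1 : Nat) : Int) + PySem.Chars.find (s.drop (np+1)) ['\n']) := by
      rw [PySem.Str.findFrom_eq, hstep]
      have : ("\n" : String).toList = ['\n'] := by decide
      rw [this]
      exact PySem.Chars.findFrom_natCast s ['\n'] (np+1) hle
    simp only [clipTextLoopA]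
    set f := PySem.Chars.find (s.drop (np+1)) ['\n'] with hf
    have hfge : -1 ≤ f := PySem.Chars.neg_one_le_find _ _
    by_cases hfneg : f = -1
    · -- no further newline at all: np is the last newline, so np = p
      have hnone : ∀ j : Nat, np < j → s[j]? ≠ some '\n' := by
        intro j hj hcon
        have : ['\n'] <:+: s.drop (np+1) := (pv_infix_drop_iff '\n' s (np+1)).2 ⟨j, by omega, hcon⟩
        exact (PySem.Chars.find_eq_neg_one_iff _ _).1 (hf ▸ hfneg) this
      have hpeq : np = p := pv_last_unique s mc np p hnp hnpm (fun j hj _ => hnone j hj) hp hpm hpmax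
      rw [hff, hfneg]
      simp [hpeq]
    · -- a further newline exists at position q = np+1+f.toNat
      have hf0 : 0 ≤ f := by omega
      have hspec := PySem.Chars.find_spec (sub := ['\n']) (s := s.drop (np+1)) (hf ▸ hf0)
      set q : Nat := np + 1 + f.toNat with hq
      have hqnl : s[q]? = some '\n' := by
        have h1 := hspec.1
        rw [List.drop_drop, ← hf] at h1
        rw [← pv_prefix_drop_iff '\n' s q]
        convert h1 using 2
      have hmin : ∀ i : Nat, np + 1 ≤ i → i < q → s[i]? ≠ some '\n' := by
        intro i hi1 hi2 hcon
        have h2 := hspec.2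
        rw [← hf] at h2
        have h3 := h2 (i - (np+1)) (by omega)
        rw [List.drop_drop] at h3
        have he : np + 1 + (i - (np + 1)) = i := by omega
        rw [he] at h3
        exact h3 ((pv_prefix_drop_iff '\n' s i).2 hcon)
      have hnext : (if f = -1 then (-1 : Int) else ((np+1 : Nat) : Int) + f) = (q : Int) := by
        rw [if_neg hfneg]; push_cast; omega
      rw [hff, hnext]
      by_cases hcmp : mc < (q : Int)
      · -- next newline exceeds budget: np is the last newline within budget
        have hnpmax : ∀ j : Nat, np < j → (j : Int) ≤ mc → s[j]? ≠ some '\n' := by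
          intro j hj1 hj2
          exact hmin j (by omega) (by omega)
        have hpeq : np = p := pv_last_unique s mc np p hnp hnpm hnpmax hp hpm hpmax
        rw [if_pos (Or.inr hcmp)]
        simp [hpeq]
      · rw [if_neg (by simp only [not_or, not_lt]; constructor <;> omega)]
        have hqlen : q < s.length := by
          by_contra hge
          rw [List.getElem?_eq_none (by omega)] at hqnl
          simp at hqnl
        exact ih q (by omega) hqnl (by omega)

-- ===== VERDICT (by name: the statement is the Claim_ definition above) =====
theorem clip_text_spec : Claim_equal_clip_text := by
  intro text max_chars _
  unfold Spec_clip_text clip_text clip_text_alt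
  have hlen : PySem.Str.len text = (text.toList.length : Int) := by simp [PySem.Str.len]
  set s := text.toList with hs
  by_cases hempty : s.length = 0
  · have htext : text = "" := by
      refine pv_string_eq_empty text ?_
      rw [← hs]
      exact List.eq_nil_of_length_eq_zero hempty
    simp [htext, PySem.Str.len]
  · rw [hlen]
    rw [if_neg (show ¬ ((s.length : Int) = 0) from by omega)]
    rw [if_neg (show ¬ ((s.length : Int) = 0) from by omega)]
    set np := PySem.Str.find text "\n" with hnp
    have hnpc : np = PySem.Chars.find s ['\n'] := by
      rw [hnp, PySem.Str.find_eq]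
      congr 1
    have hnl : ∀ i : Nat, s.length ≤ i → s[i]? ≠ some '\n' := by
      intro i hi hcon
      rw [List.getElem?_eq_none (by omega)] at hcon
      simp at hcon
    by_cases hbr : np < 0 ∨ max_chars < np
    · -- A takes the first branch: there is no newline within budget
      have hnonl : ∀ i : Nat, (i : Int) ≤ max_chars → s[i]? ≠ some '\n' := by
        rcases hbr with hneg | hgt
        · -- find returned -1: no newline at all
          have hne : np = -1 := by
            have := PySem.Chars.neg_one_le_find s ['\n']
            rw [← hnpc] at this; omega
          intro i _ hcon
          have : ['\n'] <:+: s := (pv_singleton_infix_iff '\n' s).2 (List.mem_iff_getElem?.2 ⟨i, hcon⟩)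
          exact (PySem.Chars.find_eq_neg_one_iff s ['\n']).1 (by rw [← hnpc]; exact hne) this
        · -- first newline is past the budget
          intro i hi hcon
          have hnp0 : 0 ≤ np := by
            rw [hnpc]
            rw [PySem.Chars.find_nonneg_iff]
            exact (pv_singleton_infix_iff '\n' s).2 (List.mem_iff_getElem?.2 ⟨i, hcon⟩)
          have hspec := PySem.Chars.find_spec (sub := ['\n']) (s := s) (by rw [← hnpc]; exact hnp0)
          rw [← hnpc] at hspec
          exact hspec.2 i (by omega) ((pv_prefix_drop_iff '\n' s i).2 hcon)
      -- B's pos is negative too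
      by_cases hmc : 0 ≤ max_chars
      · rw [if_pos hmc]
        rw [PySem.Str.rfindFrom_eq]
        have hnlc : ("\n" : String).toList = ['\n'] := by decide
        rw [hnlc]
        rcases pv_rfindFrom_spec s max_chars hmc with ⟨h1, _⟩ | ⟨p, h1, h2, h3, _⟩
        · rw [h1]; norm_num
          intro h1' h2'
          exact absurd hbr (by omega)
        · exact absurd h2 (hnonl p h3)
      · rw [if_neg hmc]; norm_num
        intro h1' h2'
        exact absurd hbr (by omega)
    · -- A loops: first newline is within budget
      simp only [not_or, not_lt] at hbr
      obtain ⟨hnp0, hnpmc⟩ := hbr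
      have hmc : 0 ≤ max_chars := le_trans hnp0 hnpmc
      have hspec := PySem.Chars.find_spec (sub := ['\n']) (s := s) (by rw [← hnpc]; exact hnp0)
      rw [← hnpc] at hspec
      have hnpnl : s[np.toNat]? = some '\n' := (pv_prefix_drop_iff '\n' s np.toNat).1 hspec.1
      rw [if_pos hmc, PySem.Str.rfindFrom_eq]
      have hnlc : ("\n" : String).toList = ['\n'] := by decide
      rw [hnlc]
      rcases pv_rfindFrom_spec s max_chars hmc with ⟨_, h2⟩ | ⟨p, h1, h2, h3, h4⟩
      · exact absurd hnpnl (h2 np.toNat (by omega))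
      · rw [h1, if_neg (by omega)]
        have : ((np.toNat : Nat) : Int) = np := by omega
        rw [← this]
        exact pv_loopA_spec text max_chars " ...(snip)... " p h2 h3 h4 s.length np.toNat
          (by rw [← hs]; omega) hnpnl (by omega)
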